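-- pv_equiv track=rewrite | github.com/mendarrr/Trial | trial.py | solution
-- ===== SOURCE A (Python) =====
-- def solution(A):
--     doctor_map = {}
--
--     for i in range(len(A)):
--         for hospital in A[i]:
--             if hospital not in doctor_map:
--                 doctor_map[hospital] = set()
--             doctor_map[hospital].add(i)
--
--     count = 0
--     for hospitals in doctor_map.values():
--         if len(hospitals) > 1:
--             count += 1
--
--     return count
-- ===== SOURCE B (Python) =====
-- def solution(A):
--     flat = []
--     for row in A:
--         seen = set()
--         for h in row:
--             if h not in seen:
--                 seen.add(h)
--                 flat.append(h)
--     flat.sort()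
--     count = 0
--     prev = None
--     run = 0
--     for h in flat:
--         if h == prev:
--             run += 1
--         else:
--             if run > 1:
--                 count += 1
--             prev = h
--             run = 1
--     if run > 1:
--         count += 1
--     return count
-- ===== Notes on version B (the rewrite author's own statement) =====
-- stated objective: alternative
-- what changed: Replaces the hospital->set(doctor indices) dictionary and its counting loop with a sort-then-scan: flatten the per-doctor-deduplicated hospital names into one list, sort it, and count runs of length >= 2 in a single linear scan.
import Mathlib
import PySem

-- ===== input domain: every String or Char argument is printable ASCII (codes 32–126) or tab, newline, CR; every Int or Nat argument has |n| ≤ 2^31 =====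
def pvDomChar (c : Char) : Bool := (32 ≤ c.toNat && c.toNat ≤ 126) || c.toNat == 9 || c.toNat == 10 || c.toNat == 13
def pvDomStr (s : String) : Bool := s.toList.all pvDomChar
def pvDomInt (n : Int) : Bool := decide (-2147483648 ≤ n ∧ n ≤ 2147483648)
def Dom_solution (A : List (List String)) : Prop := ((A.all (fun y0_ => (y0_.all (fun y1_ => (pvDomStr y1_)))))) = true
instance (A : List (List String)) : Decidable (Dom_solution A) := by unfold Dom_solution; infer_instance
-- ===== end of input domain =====

-- B replaces A's hospital → set-of-doctor-indices map and counting loop by a sort-then-scan: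
-- flatten the per-doctor-deduplicated hospital names, sort, and count runs of length ≥ 2
-- (objective: alternative).

-- ===== PORT A =====
def solution (A : List (List String)) : Int :=
  let doctor_map :=
    (PySem.List.pyRange 0 (A.length : Int) 1).foldl
      (fun (d : PySem.Dict String (PySem.Set Int)) i =>
        (PySem.List.pyGetD A i []).foldl
          (fun d hospital =>
            let d' := if d.contains hospital then d else d.insert hospital PySem.Set.empty
            d'.insert hospital (PySem.Set.add (d'.getD hospital PySem.Set.empty) i))
          d)
      PySem.Dict.empty
  doctor_map.values.foldl
    (fun count hospitals => if 1 < PySem.Set.len hospitals then count + 1 else count) 0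

-- ===== PORT B =====
def solution_alt (A : List (List String)) : Int :=
  let flat :=
    A.foldl
      (fun (flat : List String) row =>
        (row.foldl
          (fun (p : PySem.Set String × List String) h =>
            if p.1.contains h then p else (PySem.Set.add p.1 h, p.2 ++ [h]))
          (PySem.Set.empty, flat)).2)
      []
  let flatSorted := PySem.List.sorted flat (fun x => x) false
  let st :=
    flatSorted.foldl
      (fun (st : Int × Option String × Int) h =>
        if st.2.1 = some h then (st.1, st.2.1, st.2.2 + 1)
        else (if 1 < st.2.2 then st.1 + 1 else st.1, some h, 1))
      (0, none, 0)
  if 1 < st.2.2 then st.1 + 1 else st.1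

-- ===== PRECONDITION & SPEC =====
def Spec_solution (A : List (List String)) (out : Int) : Prop := out = solution_alt A
instance (A : List (List String)) (out : Int) : Decidable (Spec_solution A out) := by unfold Spec_solution; infer_instance

-- ===== CLAIM (what is proved, stated in full; the proofs are below) =====
def Claim_equal_solution : Prop := ∀ (A : List (List String)), Dom_solution A → Spec_solution A (solution A)

-- ===== LEMMAS AND PROOFS =====

-- number of rows (doctors) whose list contains h
def Cnt (P : List (List String)) (h : String) : Nat := P.countP (fun r => r.contains h)

-- A's inner-loop body for doctor index i
def innerA (i : Int) (d : PySem.Dict String (PySem.Set Int)) (hospital : String) :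
    PySem.Dict String (PySem.Set Int) :=
  let d' := if d.contains hospital then d else d.insert hospital PySem.Set.empty
  d'.insert hospital (PySem.Set.add (d'.getD hospital PySem.Set.empty) i)

def stepA (d : PySem.Dict String (PySem.Set Int)) (p : Int × List String) :
    PySem.Dict String (PySem.Set Int) :=
  p.2.foldl (innerA p.1) d

def dFin (A : List (List String)) : PySem.Dict String (PySem.Set Int) :=
  (PySem.List.enumerate A 0).foldl stepA PySem.Dict.empty

-- B's flattening step
def stepF (p : PySem.Set String × List String) (h : String) : PySem.Set String × List String :=
  if p.1.contains h then p else (PySem.Set.add p.1 h, p.2 ++ [h])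

def rowF (flat : List String) (row : List String) : List String :=
  (row.foldl stepF (PySem.Set.empty, flat)).2

def flatF (A : List (List String)) : List String := A.foldl rowF []

def flatS (A : List (List String)) : List String :=
  PySem.List.sorted (flatF A) (fun x => x) false

-- B's run-scan step and flush
def stepR (st : Int × Option String × Int) (h : String) : Int × Option String × Int :=
  if st.2.1 = some h then (st.1, st.2.1, st.2.2 + 1)
  else (if 1 < st.2.2 then st.1 + 1 else st.1, some h, 1)

def flushR (st : Int × Option String × Int) : Int :=
  if 1 < st.2.2 then st.1 + 1 else st.1

-- specification function: number of distinct elements occurring at least twice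
def dm : List String → Int
  | [] => 0
  | x :: xs => (if 2 ≤ xs.count x + 1 then 1 else 0) + dm (xs.filter (fun y => decide (y ≠ x)))
  termination_by l => l.length
  decreasing_by
    simp only [List.length_cons, List.length_unattach]
    exact Nat.lt_succ_of_le (le_trans (List.length_filter_le _ _) (by simp))

-- ------- A-side invariant -------

def RInv (P : List (List String)) (i : Int) (q : List String)
    (d : PySem.Dict String (PySem.Set Int)) : Prop :=
  d.keys.Nodup ∧
  (∀ h, d.contains h = true ↔ ((∃ r ∈ P, h ∈ r) ∨ h ∈ q)) ∧
  (∀ h s, d.get? h = some s →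
      s.length = Cnt P h + (if h ∈ q then 1 else 0) ∧
      (∀ x ∈ s, (0 ≤ x ∧ x < i) ∨ (x = i ∧ h ∈ q)) ∧
      (h ∈ q → i ∈ s))

def InvA (P : List (List String)) (d : PySem.Dict String (PySem.Set Int)) : Prop :=
  d.keys.Nodup ∧
  (∀ h, d.contains h = true ↔ ∃ r ∈ P, h ∈ r) ∧
  (∀ h s, d.get? h = some s →
      s.length = Cnt P h ∧ ∀ x ∈ s, 0 ≤ x ∧ x < (P.length : Int))

lemma rinv_step (P : List (List String)) (i : Int) (q : List String)
    (d : PySem.Dict String (PySem.Set Int)) (x : String) (hR : RInv P i q d) :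
    RInv P i (q ++ [x]) (innerA i d x) := by
  obtain ⟨hnd, hcon, hget⟩ := hR
  by_cases hcx : d.contains x = true
  · have hsome : (d.get? x).isSome := by
      rw [← PySem.Dict.contains_eq_isSome_get?]; exact hcx
    obtain ⟨s0, hg⟩ := Option.isSome_iff_exists.mp hsome
    have hd : innerA i d x = d.insert x (PySem.Set.add s0 i) := by
      simp [innerA, hcx, PySem.Dict.getD_of_get?_eq_some _ _ hg]
    obtain ⟨hlen0, helt0, hmem0⟩ := hget x s0 hg
    by_cases hxq : x ∈ q
    · have hiq : i ∈ s0 := hmem0 hxq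
      have hadd : PySem.Set.add s0 i = s0 := PySem.Set.add_of_mem hiq
      rw [hd, hadd]
      refine ⟨PySem.Dict.nodup_keys_insert _ _ _ hnd, ?_, ?_⟩
      · intro h
        rw [PySem.Dict.contains_insert]
        by_cases hhx : h = x
        · subst hhx; simp [hxq]
        · simp only [Bool.or_eq_true, beq_iff_eq, hhx, false_or, hcon h, List.mem_append,
            List.mem_singleton]
          rw [or_false]
      · intro h s hs
        rw [PySem.Dict.get?_insert] at hs
        split_ifs at hs with hhx
        · subst hhx
          obtain rfl : s0 = s := by simpa using hs
          refine ⟨?_, ?_, ?_⟩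
          · simpa [hxq] using hlen0
          · intro y hy
            rcases helt0 y hy with h1 | h2
            · exact Or.inl h1
            · exact Or.inr ⟨h2.1, by simp [h2.2]⟩
          · intro _; exact hiq
        · obtain ⟨l1, l2, l3⟩ := hget h s hs
          have hmq : h ∈ q ++ [x] ↔ h ∈ q := by simp [hhx]
          refine ⟨by simpa [hmq] using l1, ?_, by simpa [hmq] using l3⟩
          intro y hy
          rcases l2 y hy with h1 | h2
          · exact Or.inl h1
          · exact Or.inr ⟨h2.1, by simp [h2.2]⟩
    · have hnotin : i ∉ s0 := by
        intro hi
        rcases helt0 i hi with h1 | h2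
        · omega
        · exact hxq h2.2
      have hadd : PySem.Set.add s0 i = s0 ++ [i] := PySem.Set.add_of_not_mem hnotin
      rw [hd, hadd]
      refine ⟨PySem.Dict.nodup_keys_insert _ _ _ hnd, ?_, ?_⟩
      · intro h
        rw [PySem.Dict.contains_insert]
        by_cases hhx : h = x
        · subst hhx; simp
        · simp only [Bool.or_eq_true, beq_iff_eq, hhx, false_or, hcon h, List.mem_append,
            List.mem_singleton]
          rw [or_false]
      · intro h s hs
        rw [PySem.Dict.get?_insert] at hs
        split_ifs at hs with hhx
        · subst hhx
          obtain rfl : s0 ++ [i] = s := by simpa using hs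
          refine ⟨?_, ?_, ?_⟩
          · simp only [List.length_append, List.length_singleton]
            simp only [hxq] at hlen0
            simp [hlen0]
          · intro y hy
            rcases List.mem_append.mp hy with h1 | h2
            · rcases helt0 y h1 with ha | hb
              · exact Or.inl ha
              · exact absurd hb.2 hxq
            · simp only [List.mem_singleton] at h2
              exact Or.inr ⟨h2, by simp⟩
          · intro _; simp
        · obtain ⟨l1, l2, l3⟩ := hget h s hs
          have hmq : h ∈ q ++ [x] ↔ h ∈ q := by simp [hhx]
          refine ⟨by simpa [hmq] using l1, ?_, by simpa [hmq] using l3⟩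
          intro y hy
          rcases l2 y hy with h1 | h2
          · exact Or.inl h1
          · exact Or.inr ⟨h2.1, by simp [h2.2]⟩
  · have hcx' : d.contains x = false := by simpa using hcx
    have hxq : x ∉ q := by
      intro hq
      exact hcx ((hcon x).mpr (Or.inr hq))
    have hnorow : ¬ ∃ r ∈ P, x ∈ r := by
      intro hr
      exact hcx ((hcon x).mpr (Or.inl hr))
    have hcnt0 : Cnt P x = 0 := by
      rw [Cnt, List.countP_eq_zero]
      intro r hr
      have hnr : ¬ x ∈ r := fun hm => hnorow ⟨r, hr, hm⟩
      simpa using hnr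
    have hd : innerA i d x = d.insert x (([i] : PySem.Set Int)) := by
      simp [innerA, hcx', PySem.Dict.getD_insert_self, PySem.Dict.insert_insert_self]
    rw [hd]
    refine ⟨PySem.Dict.nodup_keys_insert _ _ _ hnd, ?_, ?_⟩
    · intro h
      rw [PySem.Dict.contains_insert]
      by_cases hhx : h = x
      · subst hhx; simp
      · simp only [Bool.or_eq_true, beq_iff_eq, hhx, false_or, hcon h, List.mem_append,
          List.mem_singleton]
        rw [or_false]
    · intro h s hs
      rw [PySem.Dict.get?_insert] at hs
      split_ifs at hs with hhx
      · subst hhx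
        obtain rfl : ([i] : PySem.Set Int) = s := by simpa using hs
        refine ⟨by simp [hcnt0, hxq], ?_, by simp⟩
        intro y hy
        simp only [List.mem_singleton] at hy
        exact Or.inr ⟨hy, by simp⟩
      · obtain ⟨l1, l2, l3⟩ := hget h s hs
        have hmq : h ∈ q ++ [x] ↔ h ∈ q := by simp [hhx]
        refine ⟨by simpa [hmq] using l1, ?_, by simpa [hmq] using l3⟩
        intro y hy
        rcases l2 y hy with h1 | h2
        · exact Or.inl h1
        · exact Or.inr ⟨h2.1, by simp [h2.2]⟩

lemma rinv_fold (P : List (List String)) (i : Int) (suf : List String) :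
    ∀ (pre : List String) (d : PySem.Dict String (PySem.Set Int)), RInv P i pre d →
      RInv P i (pre ++ suf) (suf.foldl (innerA i) d) := by
  induction suf with
  | nil => intro pre d h; simpa using h
  | cons x rest ih =>
    intro pre d h
    have h1 := rinv_step P i pre d x h
    have h2 := ih (pre ++ [x]) _ h1
    simpa [List.append_assoc] using h2

lemma inv_to_rinv (P : List (List String)) (d : PySem.Dict String (PySem.Set Int))
    (h : InvA P d) : RInv P (P.length : Int) [] d := by
  obtain ⟨h1, h2, h3⟩ := h
  refine ⟨h1, fun h' => by simpa using h2 h', ?_⟩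
  intro h' s hs
  obtain ⟨l1, l2⟩ := h3 h' s hs
  exact ⟨by simpa using l1, fun x hx => Or.inl (l2 x hx), by simp⟩

lemma rinv_to_inv (P : List (List String)) (r : List String)
    (d : PySem.Dict String (PySem.Set Int)) (h : RInv P (P.length : Int) r d) :
    InvA (P ++ [r]) d := by
  obtain ⟨h1, h2, h3⟩ := h
  refine ⟨h1, ?_, ?_⟩
  · intro h'
    rw [h2 h']
    constructor
    · rintro (⟨rr, hrr, hm⟩ | hm)
      · exact ⟨rr, by simp [hrr], hm⟩
      · exact ⟨r, by simp, hm⟩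
    · rintro ⟨rr, hrr, hm⟩
      rcases List.mem_append.mp hrr with hl | hr
      · exact Or.inl ⟨rr, hl, hm⟩
      · simp only [List.mem_singleton] at hr
        subst hr
        exact Or.inr hm
  · intro h' s hs
    obtain ⟨l1, l2, _⟩ := h3 h' s hs
    constructor
    · rw [Cnt, List.countP_append, ← Cnt]
      have : List.countP (fun rr => rr.contains h') [r] = if h' ∈ r then 1 else 0 := by
        simp [List.countP_cons]
      rw [this]
      exact l1
    · intro x hx
      rcases l2 x hx with ha | hb
      · constructor
        · exact ha.1
        · have := ha.2
          simp only [List.length_append, List.length_singleton]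
          push_cast
          omega
      · constructor
        · rw [hb.1]
          exact Int.natCast_nonneg _
        · rw [hb.1]
          simp only [List.length_append, List.length_singleton]
          push_cast
          omega

lemma inv_outer (L : List (List String)) :
    ∀ (P : List (List String)) (d : PySem.Dict String (PySem.Set Int)), InvA P d →
      InvA (P ++ L) ((PySem.List.enumerate L (P.length : Int)).foldl stepA d) := by
  induction L with
  | nil => intro P d h; simpa using h
  | cons r rest ih =>
    intro P d h
    rw [PySem.List.enumerate_cons, List.foldl_cons]
    have h1 : RInv P (P.length : Int) ([] ++ r) (r.foldl (innerA (P.length : Int)) d) :=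
      rinv_fold P (P.length : Int) r [] d (inv_to_rinv P d h)
    have h2 : InvA (P ++ [r]) (stepA d ((P.length : Int), r)) := by
      apply rinv_to_inv
      simpa [stepA] using h1
    have h3 := ih (P ++ [r]) _ h2
    have e : (((P ++ [r]).length : Nat) : Int) = (P.length : Int) + 1 := by
      simp
    rw [e] at h3
    simpa [List.append_assoc] using h3

lemma inv_dFin (A : List (List String)) : InvA A (dFin A) := by
  have h0 : InvA [] (PySem.Dict.empty : PySem.Dict String (PySem.Set Int)) := by
    refine ⟨by simp, ?_, ?_⟩
    · intro h; simp [PySem.Dict.contains_empty]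
    · intro h s hs; simp [PySem.Dict.get?_empty] at hs
  have := inv_outer A [] PySem.Dict.empty h0
  simpa [dFin] using this

lemma solutionA_counts (A : List (List String)) :
    solution A = (((dFin A).keys.countP (fun k => decide (2 ≤ Cnt A k)) : Nat) : Int) := by
  obtain ⟨hnd, hcon, hget⟩ := inv_dFin A
  have h1 : solution A = (dFin A).values.foldl
      (fun count hospitals => if 1 < PySem.Set.len hospitals then count + 1 else count) 0 := by
    rw [solution, dFin, PySem.List.enumerate_eq_map_pyRange (d := ([] : List String)),
      List.foldl_map]
    rfl
  rw [h1, PySem.List.foldl_ite_add_one]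
  rw [PySem.Dict.values_eq_map_keys (dFin A) hnd ([] : PySem.Set Int), List.countP_map]
  have h2 : ∀ k ∈ (dFin A).keys,
      (((fun x => decide (1 < PySem.Set.len x)) ∘ fun k => (dFin A).getD k ([] : PySem.Set Int)) k
        = true ↔ (fun k => decide (2 ≤ Cnt A k)) k = true) := by
    intro k hk
    have hck : (dFin A).contains k = true := (PySem.Dict.contains_iff_mem_keys _ _).mpr hk
    have hsome : ((dFin A).get? k).isSome := by
      rw [← PySem.Dict.contains_eq_isSome_get?]; exact hck
    obtain ⟨s, hs⟩ := Option.isSome_iff_exists.mp hsome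
    have hlen := (hget k s hs).1
    simp only [Function.comp_apply, PySem.Dict.getD_of_get?_eq_some _ _ hs,
      PySem.Set.len, decide_eq_true_eq]
    omega
  rw [List.countP_congr h2]
  simp

-- ------- B-side: counts in the flattened list -------

lemma rowfold_count (row : List String) :
    ∀ (S : PySem.Set String) (l : List String) (h : String),
      ((row.foldl stepF (S, l)).2).count h
        = l.count h + (if h ∈ row ∧ h ∉ S then 1 else 0) := by
  induction row with
  | nil => intro S l h; simp
  | cons x rest ih =>
    intro S l h
    rw [List.foldl_cons]
    by_cases hxS : x ∈ S
    · have : stepF (S, l) x = (S, l) := by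
        simp [stepF, List.contains_eq_mem, hxS]
      rw [this, ih S l h]
      congr 1
      by_cases hhS : h ∈ S
      · simp [hhS]
      · by_cases h1 : h ∈ rest
        · simp [List.mem_cons, h1, hhS]
        · simp [List.mem_cons, h1, hhS]
          intro e
          subst e
          exact absurd hxS hhS
    · have hstep : stepF (S, l) x = (S ++ [x], l ++ [x]) := by
        simp [stepF, List.contains_eq_mem, hxS]
      rw [hstep, ih (S ++ [x]) (l ++ [x]) h]
      by_cases hhx : h = x
      · subst hhx
        simp [List.count_append, hxS]
      · have hxh : ¬ (x = h) := fun e => hhx e.symm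
        have e1 : (l ++ [x]).count h = l.count h := by
          simp [List.count_append, hxh]
        rw [e1]
        congr 1
        simp only [List.mem_append, List.mem_cons, not_or]
        by_cases h1 : h ∈ rest <;> by_cases h2 : h ∈ S <;> simp [h1, h2, hhx]

lemma flat_count (A : List (List String)) :
    ∀ (l0 : List String) (h : String),
      (A.foldl rowF l0).count h = l0.count h + Cnt A h := by
  induction A with
  | nil => intro l0 h; simp [Cnt]
  | cons row rest ih =>
    intro l0 h
    rw [List.foldl_cons, ih (rowF l0 row) h]
    have e1 : (rowF l0 row).count h = l0.count h + (if h ∈ row then 1 else 0) := by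
      rw [rowF, rowfold_count row PySem.Set.empty l0 h]
      congr 1
      simp [PySem.Set.empty]
    rw [e1]
    simp only [Cnt, List.countP_cons, List.contains_eq_mem]
    by_cases hm : h ∈ row
    · simp [hm]
      omega
    · simp [hm]

lemma flatS_count (A : List (List String)) (h : String) :
    (flatS A).count h = Cnt A h := by
  rw [flatS, (PySem.List.sorted_perm (flatF A) (fun x => x) false).count_eq]
  rw [flatF, flat_count A [] h]
  simp

-- ------- run-scan = dm on a sorted list -------

lemma run_go (l : List String) (hl : l.Pairwise (· ≤ ·)) :
    ∀ (c r : Int) (p : String), 1 ≤ r → (∀ y ∈ l, p ≤ y) →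
      flushR (l.foldl stepR (c, some p, r)) =
        (if 1 < r + (l.count p : Int) then c + 1 else c)
          + dm (l.filter (fun y => decide (y ≠ p))) := by
  induction l with
  | nil =>
    intro c r p hr _
    simp only [List.foldl_nil, List.count_nil, List.filter_nil, dm.eq_1, flushR]
    norm_num
  | cons x xs ih =>
    rw [List.pairwise_cons] at hl
    obtain ⟨hx, hxs⟩ := hl
    intro c r p hr hp
    by_cases hpx : p = x
    · subst hpx
      have hstep : stepR (c, some p, r) p = (c, some p, r + 1) := by
        simp [stepR]
      rw [List.foldl_cons, hstep, ih hxs c (r + 1) p (by omega) hx]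
      have e1 : ((p :: xs).count p : Int) = (xs.count p : Int) + 1 := by
        rw [List.count_cons_self]; push_cast; ring
      have e2 : (p :: xs).filter (fun y => decide (y ≠ p)) = xs.filter (fun y => decide (y ≠ p)) := by
        simp
      rw [e1, e2]
      have e5 : r + 1 + (xs.count p : Int) = r + ((xs.count p : Int) + 1) := by ring
      simp only [e5]
    · have hne : ¬ ((some p : Option String) = some x) := by
        simp [hpx]
      have hstep : stepR (c, some p, r) x
          = (if 1 < r then c + 1 else c, some x, 1) := by
        simp [stepR, hne]
      have hpxs : p ∉ xs := by
        intro hmem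
        exact hpx (le_antisymm (hp x (by simp)) (by
          have h1 := hx p hmem
          exact h1))
      have hpcnt : (x :: xs).count p = 0 := by
        rw [List.count_eq_zero]
        simp only [List.mem_cons, not_or]
        exact ⟨hpx, hpxs⟩
      rw [List.foldl_cons, hstep,
        ih hxs (if 1 < r then c + 1 else c) 1 x (by omega) hx]
      have hxp : x ≠ p := Ne.symm hpx
      have e2 : (x :: xs).filter (fun y => decide (y ≠ p))
          = x :: xs.filter (fun y => decide (y ≠ p)) := by
        simp [hxp]
      have e3 : xs.filter (fun y => decide (y ≠ p)) = xs := by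
        apply List.filter_eq_self.mpr
        intro a ha
        simp only [decide_eq_true_eq]
        intro e
        subst e
        exact hpxs ha
      rw [e2, e3, hpcnt]
      have e4 : dm (x :: xs)
          = (if 2 ≤ xs.count x + 1 then 1 else 0)
            + dm (xs.filter (fun y => decide (y ≠ x))) := by
        rw [dm.eq_2]
      rw [e4]
      by_cases hc : 1 ≤ xs.count x
      · have hb1 : (1 : Int) < 1 + (xs.count x : Int) := by
          have : (1 : Int) ≤ (xs.count x : Int) := by exact_mod_cast hc
          omega
        have hb2 : 2 ≤ xs.count x + 1 := by omega
        simp only [if_pos hb1, if_pos hb2]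
        push_cast
        ring_nf
      · have hc0 : xs.count x = 0 := by omega
        have hb1 : ¬ ((1 : Int) < 1 + (xs.count x : Int)) := by
          rw [hc0]; norm_num
        have hb2 : ¬ (2 ≤ xs.count x + 1) := by omega
        simp only [if_neg hb1, if_neg hb2]
        push_cast
        ring_nf

lemma runscan_eq_dm (l : List String) (hl : l.Pairwise (· ≤ ·)) :
    flushR (l.foldl stepR (0, none, 0)) = dm l := by
  cases l with
  | nil =>
    simp only [List.foldl_nil, flushR, dm.eq_1]
    norm_num
  | cons x xs =>
    rw [List.pairwise_cons] at hl
    obtain ⟨hx, hxs⟩ := hl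
    have hstep : stepR (0, none, 0) x = (0, some x, 1) := by
      simp [stepR]
    rw [List.foldl_cons, hstep, run_go xs hxs 0 1 x (by omega) hx]
    have e4 : dm (x :: xs)
        = (if 2 ≤ xs.count x + 1 then 1 else 0)
          + dm (xs.filter (fun y => decide (y ≠ x))) := by
      rw [dm.eq_2]
    rw [e4]
    by_cases hc : 1 ≤ xs.count x
    · have hb1 : (1 : Int) < 1 + (xs.count x : Int) := by
        have : (1 : Int) ≤ (xs.count x : Int) := by exact_mod_cast hc
        omega
      have hb2 : 2 ≤ xs.count x + 1 := by omega
      simp [hb1, hb2]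
    · have hc0 : xs.count x = 0 := by omega
      have hb1 : ¬ ((1 : Int) < 1 + (xs.count x : Int)) := by
        rw [hc0]; norm_num
      have hb2 : ¬ (2 ≤ xs.count x + 1) := by omega
      simp [hc0]

-- ------- dm counts distinct elements with multiplicity ≥ 2 -------

lemma dm_eq_countP_aux : ∀ (n : Nat) (m : List String), m.length ≤ n →
    ∀ (K : List String), K.Nodup → (∀ h, h ∈ K ↔ h ∈ m) →
      ((K.countP (fun h => decide (2 ≤ m.count h)) : Nat) : Int) = dm m := by
  intro n
  induction n with
  | zero =>
    intro m hlen K hK hmem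
    cases m with
    | nil =>
      have hK0 : K = [] := by
        apply List.eq_nil_iff_forall_not_mem.mpr
        intro a ha
        simpa using (hmem a).mp ha
      subst hK0
      simp [dm.eq_1]
    | cons a as => simp at hlen
  | succ n ihn =>
    intro m hlen K hK hmem
    cases m with
    | nil =>
      have hK0 : K = [] := by
        apply List.eq_nil_iff_forall_not_mem.mpr
        intro a ha
        simpa using (hmem a).mp ha
      subst hK0
      simp [dm.eq_1]
    | cons x xs =>
      have hxK : x ∈ K := (hmem x).mpr (by simp)
      have hperm : K.Perm (x :: K.erase x) := List.perm_cons_erase hxK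
      have herase : K.erase x = K.filter (fun y => decide (y ≠ x)) := by
        rw [List.Nodup.erase_eq_filter hK]
        apply List.filter_congr
        intro y _
        by_cases hy : y = x <;> simp [hy]
      set K' := K.filter (fun y => decide (y ≠ x)) with hK'
      have hK'nd : K'.Nodup := hK.filter _
      have hK'mem : ∀ h, h ∈ K' ↔ h ∈ xs.filter (fun y => decide (y ≠ x)) := by
        intro h
        rw [hK', List.mem_filter, List.mem_filter, hmem h]
        simp only [List.mem_cons, decide_eq_true_eq]
        constructor
        · rintro ⟨hm | hm, hne⟩
          · exact absurd hm hne
          · exact ⟨hm, hne⟩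
        · rintro ⟨hm, hne⟩
          exact ⟨Or.inr hm, hne⟩
      have hcount : ∀ h ∈ K',
          ((fun h => decide (2 ≤ (x :: xs).count h)) h = true
            ↔ (fun h => decide (2 ≤ (xs.filter (fun y => decide (y ≠ x))).count h)) h = true) := by
        intro h hh
        have hne : h ≠ x := by
          rw [hK', List.mem_filter] at hh
          simpa using hh.2
        have e1 : (x :: xs).count h = xs.count h := by
          rw [List.count_cons]
          simp [Ne.symm hne]
        have e2 : (xs.filter (fun y => decide (y ≠ x))).count h = xs.count h :=
          List.count_filter (by simp [hne])
        simp only [decide_eq_true_eq]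
        rw [e1, e2]
      have hsplit : K.countP (fun h => decide (2 ≤ (x :: xs).count h))
          = (if 2 ≤ (x :: xs).count x then 1 else 0)
            + K'.countP (fun h => decide (2 ≤ (x :: xs).count h)) := by
        rw [hperm.countP_eq, List.countP_cons, ← herase]
        simp
        exact Nat.add_comm _ _
      have hlen' : (xs.filter (fun y => decide (y ≠ x))).length ≤ n := by
        have h1 := List.length_filter_le (fun y => decide (y ≠ x)) xs
        simp only [List.length_cons] at hlen
        omega
      have hrec := ihn (xs.filter (fun y => decide (y ≠ x))) hlen' K' hK'nd hK'mem
      rw [hsplit, List.countP_congr hcount, dm.eq_2, ← hrec]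
      have ecnt : (x :: xs).count x = xs.count x + 1 := List.count_cons_self
      rw [ecnt]
      split_ifs with hb <;> push_cast <;> omega

lemma dm_eq_countP (m : List String) (K : List String) (hK : K.Nodup)
    (hmem : ∀ h, h ∈ K ↔ h ∈ m) :
    ((K.countP (fun h => decide (2 ≤ m.count h)) : Nat) : Int) = dm m :=
  dm_eq_countP_aux m.length m le_rfl K hK hmem

-- ------- glue -------

lemma solution_alt_eq (A : List (List String)) :
    solution_alt A = flushR ((flatS A).foldl stepR (0, none, 0)) := rfl

-- ===== VERDICT (by name: the statement is the Claim_ definition above) =====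
theorem solution_spec : Claim_equal_solution := by
  intro A _
  unfold Spec_solution
  obtain ⟨hnd, hcon, hget⟩ := inv_dFin A
  have hcnt : ∀ h, (flatS A).count h = Cnt A h := flatS_count A
  have hmem : ∀ h, h ∈ (dFin A).keys ↔ h ∈ flatS A := by
    intro h
    rw [← PySem.Dict.contains_iff_mem_keys, ← List.count_pos_iff, hcnt h]
    rw [hcon h]
    constructor
    · rintro ⟨r, hr, hm⟩
      rw [Cnt]
      apply List.countP_pos_iff.mpr
      exact ⟨r, hr, by simpa [List.contains_eq_mem] using hm⟩
    · intro hpos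
      obtain ⟨r, hr, hm⟩ := List.countP_pos_iff.mp hpos
      exact ⟨r, hr, by simpa [List.contains_eq_mem] using hm⟩
  have hpred : (fun k => decide (2 ≤ Cnt A k))
      = (fun k => decide (2 ≤ (flatS A).count k)) := by
    funext k
    rw [hcnt k]
  have hpair : (flatS A).Pairwise (· ≤ ·) := by
    have := PySem.List.sorted_pairwise (flatF A) (fun x => x) 
    exact this
  rw [solutionA_counts A, hpred, dm_eq_countP (flatS A) (dFin A).keys hnd hmem,
    solution_alt_eq A, runscan_eq_dm (flatS A) hpair]
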